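-- pv_equiv track=rewrite | github.com/brandonharris177/edabit-challanges | index.py | magicalWell
-- ===== SOURCE A (Python) =====
-- def magicalWell(a, b, n):
--     total = 0
--     while n > 0:
--         total = a*b + total
--         a += 1
--         b += 1
--         n -= 1
--
--     return total
-- ===== SOURCE B (Python) =====
-- def magicalWell(a, b, n):
--     m = max(n, 0)
--     return m*a*b + (a+b)*m*(m-1)//2 + (m-1)*m*(2*m-1)//6
-- ===== Notes on version B (the rewrite author's own statement) =====
-- stated objective: faster
-- what changed: Replaces the O(n) accumulation loop by the closed-form sum m*a*b + (a+b)*m(m-1)/2 + (m-1)m(2m-1)/6 with m = max(n,0).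
import Mathlib
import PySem

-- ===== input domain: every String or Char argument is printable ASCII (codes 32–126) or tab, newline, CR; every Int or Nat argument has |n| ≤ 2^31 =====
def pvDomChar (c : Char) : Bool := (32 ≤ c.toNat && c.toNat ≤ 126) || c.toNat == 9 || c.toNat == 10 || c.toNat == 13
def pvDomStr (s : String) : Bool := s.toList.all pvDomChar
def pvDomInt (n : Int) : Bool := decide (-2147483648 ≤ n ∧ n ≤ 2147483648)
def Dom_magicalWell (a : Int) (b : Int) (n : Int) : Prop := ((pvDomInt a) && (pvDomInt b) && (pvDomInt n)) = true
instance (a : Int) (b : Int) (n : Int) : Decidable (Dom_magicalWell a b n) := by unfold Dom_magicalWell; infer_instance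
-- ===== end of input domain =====

-- B replaces A's O(n) accumulation loop by the O(1) closed-form sum of squares/linear terms.


-- ===== PORT A =====
-- the while loop of A, with state (a, b, n, total)
def magicalWellGo (a b n total : Int) : Int :=
  if n > 0 then magicalWellGo (a + 1) (b + 1) (n - 1) (a * b + total) else total
termination_by n.toNat
decreasing_by omega

def magicalWell (a : Int) (b : Int) (n : Int) : Int :=
  magicalWellGo a b n 0

-- ===== PORT B =====
def magicalWell_alt (a : Int) (b : Int) (n : Int) : Int :=
  let m := max n 0
  m * a * b + PySem.Int.floordiv ((a + b) * m * (m - 1)) 2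
            + PySem.Int.floordiv ((m - 1) * m * (2 * m - 1)) 6

-- ===== PRECONDITION & SPEC =====
def Spec_magicalWell (a : Int) (b : Int) (n : Int) (out : Int) : Prop := out = magicalWell_alt a b n
instance (a : Int) (b : Int) (n : Int) (out : Int) : Decidable (Spec_magicalWell a b n out) := by unfold Spec_magicalWell; infer_instance

-- ===== CLAIM (what is proved, stated in full; the proofs are below) =====
def Claim_equal_magicalWell : Prop := ∀ (a : Int) (b : Int) (n : Int), Dom_magicalWell a b n → Spec_magicalWell a b n (magicalWell a b n)

-- ===== LEMMAS AND PROOFS =====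

-- exact division: when d ∣ x and d > 0, Python's floor division is exact
theorem pv_floordiv_exact {x d : Int} (hd : 0 < d) (hdvd : d ∣ x) :
    d * PySem.Int.floordiv x d = x := by
  rw [PySem.Int.floordiv_eq_ediv_of_pos hd]
  exact Int.mul_ediv_cancel' hdvd

theorem pv_two_dvd (m : Int) : (2 : Int) ∣ m * (m - 1) := by
  rcases Int.even_or_odd m with ⟨k, hk⟩ | ⟨k, hk⟩
  · exact ⟨k * (m - 1), by rw [hk]; ring⟩
  · exact ⟨m * k, by rw [hk]; ring⟩

theorem pv_six_dvd (k : Nat) : (6 : Int) ∣ ((k : Int) - 1) * k * (2 * k - 1) := by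
  induction k with
  | zero => exact ⟨0, by norm_num⟩
  | succ k ih =>
    obtain ⟨c, hc⟩ := ih
    exact ⟨c + (k : Int) * k, by push_cast; push_cast at hc; nlinarith [hc]⟩

theorem pv_go_mul6 (k : Nat) : ∀ (a b t : Int),
    6 * magicalWellGo a b (k : Int) t =
      6 * t + 6 * k * a * b + 3 * (a + b) * k * ((k : Int) - 1)
        + ((k : Int) - 1) * k * (2 * k - 1) := by
  induction k with
  | zero =>
    intro a b t
    rw [magicalWellGo]
    norm_num
  | succ k ih =>
    intro a b t
    rw [magicalWellGo]
    have hpos : ((k : Int) + 1) > 0 := by positivity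
    have hstep : ((k + 1 : Nat) : Int) - 1 = (k : Int) := by push_cast; ring
    push_cast
    simp only [hpos]
    have := ih (a + 1) (b + 1) (a * b + t)
    have h1 : ((k + 1 : Nat) : Int) - 1 = (k : Int) := by push_cast; ring
    push_cast at this ⊢
    have harg : (k : Int) + 1 - 1 = (k : Int) := by ring
    rw [harg]
    nlinarith [this]

-- ===== VERDICT (by name: the statement is the Claim_ definition above) =====
theorem magicalWell_spec : Claim_equal_magicalWell := by
  intro a b n _
  unfold Spec_magicalWell magicalWell magicalWell_alt
  by_cases hn : n > 0
  · have hm : max n 0 = n := by omega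
    simp only [hm]
    set m : Int := n with hmdef
    have hk : (n.toNat : Int) = n := by omega
    have h6 := pv_go_mul6 n.toNat a b 0
    rw [hk] at h6
    have hT := pv_floordiv_exact (x := (a + b) * n * (n - 1)) (by norm_num : (0:Int) < 2)
      (by have := pv_two_dvd n; exact Dvd.dvd.mul_left (by exact this) (a+b) |>.trans (by rw [mul_assoc]))
    have hP0 := pv_six_dvd n.toNat
    rw [hk] at hP0
    have hP := pv_floordiv_exact (by norm_num : (0:Int) < 6) hP0
    nlinarith [hT, hP, h6]
  · have hm : max n 0 = 0 := by omega
    rw [magicalWellGo]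
    simp [hn, hm, PySem.Int.floordiv]
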